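-- pv_equiv track=rewrite | github.com/realOskarA/adventofcode2023 | day6.py | calc
-- ===== SOURCE A (Python) =====
-- def calc(time: int, distance: int) -> int:
--
--     possibles = 0
--     for t in range(1, time):
--         traved_time = time - t
--         speed = t
--         traveled = traved_time * speed
--         if traveled > distance:
--             possibles += 1
--
--     return possibles
-- ===== SOURCE B (Python) =====
-- def calc(time: int, distance: int) -> int:
--     # Count t in [1, time) with t*(time-t) > distance, by binary search:
--     # f(t) = t*(time-t) is symmetric about time/2 and increasing on [1, time//2],
--     # so the winning t form a contiguous block [lo, time-lo].
--     if time <= 1: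
--         return 0
--     mid = time // 2
--     if mid * (time - mid) <= distance:
--         return 0
--     lo, hi = 1, mid
--     while lo < hi:
--         m = (lo + hi) // 2
--         if m * (time - m) > distance:
--             hi = m
--         else:
--             lo = m + 1
--     return time - 2 * lo + 1
-- ===== Notes on version B (the rewrite author's own statement) =====
-- stated objective: faster
-- what changed: replaces the linear scan over all t in [1,time) by a binary search for the smallest winning t, exploiting that t*(time-t) is unimodal and symmetric, then returns the block size time-2*lo+1 in closed form
import Mathlib
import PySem

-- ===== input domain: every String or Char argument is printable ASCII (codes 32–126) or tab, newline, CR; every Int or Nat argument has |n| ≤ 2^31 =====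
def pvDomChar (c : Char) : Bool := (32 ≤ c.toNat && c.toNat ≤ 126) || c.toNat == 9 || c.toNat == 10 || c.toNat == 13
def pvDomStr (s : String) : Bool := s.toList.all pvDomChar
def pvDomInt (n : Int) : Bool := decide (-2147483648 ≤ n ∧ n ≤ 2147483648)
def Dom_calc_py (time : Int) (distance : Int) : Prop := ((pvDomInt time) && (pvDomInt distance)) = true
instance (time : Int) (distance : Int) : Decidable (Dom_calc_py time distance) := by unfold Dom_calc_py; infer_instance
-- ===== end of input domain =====

-- B replaces A's linear scan with a binary search for the smallest winning t (the winners form a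
-- contiguous block by unimodality/symmetry of t*(time-t)); objective: faster (O(log time) vs O(time)).


-- ===== PORT A =====
def calc_py (time : Int) (distance : Int) : Int :=
  (PySem.List.pyRange 1 time 1).foldl
    (fun possibles t =>
      let traved_time := time - t
      let speed := t
      let traveled := traved_time * speed
      if traveled > distance then possibles + 1 else possibles) 0

-- ===== PORT B =====
-- the while loop of Source B: binary search for the smallest t in [lo, hi] with t*(time-t) > distance
def calcBsearch (time : Int) (distance : Int) (lo : Int) (hi : Int) : Int :=
  if h : lo < hi then
    let m := PySem.Int.floordiv (lo + hi) 2
    if m * (time - m) > distance then calcBsearch time distance lo m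
    else calcBsearch time distance (m + 1) hi
  else lo
termination_by (hi - lo).toNat
decreasing_by
  · have h1 := (PySem.Int.floordiv_two_mid_bounds (le_of_lt h)).1
    have h2 : PySem.Int.floordiv (lo + hi) 2 < hi := by
      rw [PySem.Int.floordiv_lt_iff_lt_mul (by omega)]; omega
    omega
  · have h1 : lo ≤ PySem.Int.floordiv (lo + hi) 2 :=
      (PySem.Int.floordiv_two_mid_bounds (le_of_lt h)).1
    have h2 : PySem.Int.floordiv (lo + hi) 2 < hi := by
      rw [PySem.Int.floordiv_lt_iff_lt_mul (by omega)]; omega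
    omega

def calc_py_alt (time : Int) (distance : Int) : Int :=
  if time ≤ 1 then 0
  else
    let mid := PySem.Int.floordiv time 2
    if mid * (time - mid) ≤ distance then 0
    else time - 2 * calcBsearch time distance 1 mid + 1

-- ===== PRECONDITION & SPEC =====
def Spec_calc_py (time : Int) (distance : Int) (out : Int) : Prop := out = calc_py_alt time distance
instance (time : Int) (distance : Int) (out : Int) : Decidable (Spec_calc_py time distance out) := by unfold Spec_calc_py; infer_instance

-- ===== CLAIM (what is proved, stated in full; the proofs are below) =====
def Claim_equal_calc_py : Prop := ∀ (time : Int) (distance : Int), Dom_calc_py time distance → Spec_calc_py time distance (calc_py time distance)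

-- ===== LEMMAS AND PROOFS =====

-- A's accumulating loop is a countP
theorem pv_foldl_count_eq (p : Int → Prop) [DecidablePred p] (l : List Int) (acc : Int) :
    l.foldl (fun a t => if p t then a + 1 else a) acc
      = acc + (l.countP (fun t => decide (p t)) : Int) := by
  induction l generalizing acc with
  | nil => simp
  | cons x xs ih =>
    simp only [List.foldl_cons, List.countP_cons, ih]
    by_cases h : p x
    · rw [if_pos h, if_pos (by simpa using h)]; push_cast; ring
    · rw [if_neg h, if_neg (by simpa using h)]; push_cast; ring

-- counting the integers of an interval inside pyRange
theorem pv_countP_interval (a b u v : Int) :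
    ((PySem.List.pyRange u v 1).countP (fun t => decide (a ≤ t ∧ t ≤ b)) : Int)
      = max 0 (min v (b + 1) - max u a) := by
  by_cases huv : v ≤ u
  · rw [PySem.List.pyRange_one_eq_nil huv]
    simp only [List.countP_nil, Nat.cast_zero]
    omega
  · push_neg at huv
    rw [PySem.List.pyRange_one_cons huv, List.countP_cons]
    have ih := pv_countP_interval a b (u + 1) v
    by_cases hp : a ≤ u ∧ u ≤ b
    · rw [if_pos (by simpa using hp)]; push_cast; omega
    · rw [if_neg (by simpa using hp)]; push_cast; omega
termination_by (v - u).toNat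
decreasing_by omega

-- binary-search invariant: the result is the smallest winning t
theorem pv_calcBsearch_min (time distance lo hi : Int)
    (hlo : 1 ≤ lo) (hle : lo ≤ hi)
    (hhi : hi * (time - hi) > distance)
    (hbelow : ∀ t : Int, 1 ≤ t → t < lo → ¬ t * (time - t) > distance) :
    lo ≤ calcBsearch time distance lo hi ∧ calcBsearch time distance lo hi ≤ hi ∧
      calcBsearch time distance lo hi * (time - calcBsearch time distance lo hi) > distance ∧
      ∀ t : Int, 1 ≤ t → t < calcBsearch time distance lo hi → ¬ t * (time - t) > distance := by
  rw [calcBsearch]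
  by_cases h : lo < hi
  · simp only [h, dif_pos]
    have hm1 : lo ≤ PySem.Int.floordiv (lo + hi) 2 :=
      (PySem.Int.floordiv_two_mid_bounds (le_of_lt h)).1
    have hm2 : PySem.Int.floordiv (lo + hi) 2 < hi := by
      rw [PySem.Int.floordiv_lt_iff_lt_mul (by omega)]; omega
    set m := PySem.Int.floordiv (lo + hi) 2 with hm
    by_cases hp : m * (time - m) > distance
    · simp only [hp, if_pos]
      have ih := pv_calcBsearch_min time distance lo m hlo hm1 hp hbelow
      exact ⟨ih.1, by omega, ih.2.2⟩
    · simp only [hp, if_neg, if_false]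
      push_neg at hp
      have hbelow' : ∀ t : Int, 1 ≤ t → t < m + 1 → ¬ t * (time - t) > distance := by
        intro t ht1 htm hft
        by_cases htlo : t < lo
        · exact hbelow t ht1 htlo hft
        · push_neg at htlo
          -- concavity: (hi-t)*f(m) - (hi-m)*f(t) - (m-t)*f(hi) = (m-t)*(hi-m)*(hi-t) ≥ 0,
          -- yet f(t) > d, f(hi) > d, f(m) ≤ d with hi - t > 0: contradiction
          have e1 : (hi - m) * (t * (time - t) - (distance + 1)) ≥ 0 :=
            mul_nonneg (by omega) (by omega)
          have e2 : (m - t) * (hi * (time - hi) - (distance + 1)) ≥ 0 :=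
            mul_nonneg (by omega) (by omega)
          have e3 : (hi - t) * (distance - m * (time - m)) ≥ 0 :=
            mul_nonneg (by omega) (by omega)
          have e4 : (m - t) * ((hi - m) * (hi - t)) ≥ 0 :=
            mul_nonneg (by omega) (mul_nonneg (by omega) (by omega))
          nlinarith [e1, e2, e3, e4]
      have ih := pv_calcBsearch_min time distance (m + 1) hi (by omega) (by omega) hhi hbelow'
      exact ⟨by omega, ih.2.1, ih.2.2⟩
  · simp only [h, dif_neg, not_false_iff]
    have heq : lo = hi := le_antisymm hle (not_lt.mp h)
    exact ⟨le_refl _, le_of_eq heq, heq ▸ hhi, fun t ht1 ht2 => hbelow t ht1 ht2⟩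
termination_by (hi - lo).toNat
decreasing_by
  · omega
  · omega

theorem calc_py_spec_aux : ∀ (time distance : Int),
    calc_py time distance = calc_py_alt time distance := by
  intro time distance
  have hfold : calc_py time distance
      = 0 + ((PySem.List.pyRange 1 time 1).countP
          (fun t => decide ((time - t) * t > distance)) : Int) := by
    unfold calc_py
    exact pv_foldl_count_eq (fun t => (time - t) * t > distance) _ _
  rw [hfold]
  unfold calc_py_alt
  by_cases ht : time ≤ 1
  · rw [PySem.List.pyRange_one_eq_nil ht]
    simp [ht]
  · push_neg at ht
    have ht' : ¬ time ≤ 1 := by omega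
    simp only [ht', if_false]
    have hmid : 2 * PySem.Int.floordiv time 2 ≤ time ∧ time ≤ 2 * PySem.Int.floordiv time 2 + 1 := by
      rw [PySem.Int.floordiv_eq_ediv_of_pos (by omega)]
      omega
    set mid := PySem.Int.floordiv time 2 with hm
    have hmid1 : 1 ≤ mid := by omega
    by_cases hz : mid * (time - mid) ≤ distance
    · rw [if_pos hz]
      have hzero : (PySem.List.pyRange 1 time 1).countP
          (fun t => decide ((time - t) * t > distance)) = 0 := by
        rw [List.countP_eq_zero]
        intro t htmem
        rw [PySem.List.mem_pyRange_one] at htmem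
        simp only [decide_eq_true_eq, not_lt]
        have hfac : (mid - t) * (time - mid - t) ≥ 0 := by
          by_cases hc : t ≤ mid
          · exact mul_nonneg (by omega) (by omega)
          · have : (t - mid) * (t - (time - mid)) ≥ 0 := mul_nonneg (by omega) (by omega)
            nlinarith [this]
        nlinarith [hfac]
      rw [hzero]
      simp
    · push_neg at hz
      rw [if_neg (by omega)]
      obtain ⟨hr1, hr2, hrwin, hrmin⟩ :=
        pv_calcBsearch_min time distance 1 mid (le_refl 1) hmid1 hz (by omega)
      set r := calcBsearch time distance 1 mid with hrdef
      have hcong : (PySem.List.pyRange 1 time 1).countP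
            (fun t => decide ((time - t) * t > distance))
          = (PySem.List.pyRange 1 time 1).countP (fun t => decide (r ≤ t ∧ t ≤ time - r)) := by
        apply List.countP_congr
        intro t htmem
        rw [PySem.List.mem_pyRange_one] at htmem
        simp only [decide_eq_true_eq, decide_eq_decide]
        constructor
        · intro hft
          constructor
          · by_contra hc
            exact hrmin t (by omega) (by omega) (by nlinarith)
          · by_contra hc
            push_neg at hc
            have hs := hrmin (time - t) (by omega) (by omega)
            exact hs (by nlinarith)
        · intro hint
          obtain ⟨h1, h2⟩ := hint
          have hnn : (t - r) * (time - t - r) ≥ 0 := mul_nonneg (by omega) (by omega)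
          nlinarith [hnn, hrwin]
      rw [hcong, pv_countP_interval r (time - r) 1 time]
      omega

-- ===== VERDICT (by name: the statement is the Claim_ definition above) =====
theorem calc_py_spec : Claim_equal_calc_py := by
  intro time distance _
  exact calc_py_spec_aux time distance
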